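-- pv_equiv track=rewrite | github.com/ctc316/algorithm-python | Lintcode/Ladder_all_G_OA/1629. Find the nearest store.py | findNearestStore
-- ===== SOURCE A (Python) =====
-- def findNearestStore(stores, houses):
--     from bisect import bisect_left
--     stores = sorted(stores)
--     result = []
--     for house in houses:
--         pos = bisect_left(stores, house)
--         if pos == 0:
--             result.append(stores[0])
--         elif pos == len(stores):
--             result.append(stores[-1])
--         elif house - stores[pos - 1] <= stores[pos] - house:
--             result.append(stores[pos - 1])
--         else:
--             result.append(stores[pos])
--
--     return result
-- ===== SOURCE B (Python) =====
-- def findNearestStore(stores, houses):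
--     result = []
--     for house in houses:
--         best = stores[0]
--         for s in stores:
--             d = abs(house - s)
--             bd = abs(house - best)
--             if d < bd or (d == bd and s < best):
--                 best = s
--         result.append(best)
--     return result
-- ===== Notes on version B (the rewrite author's own statement) =====
-- stated objective: simpler
-- what changed: Replaced sort + bisect binary search with a direct linear scan per house that keeps the running nearest store, breaking distance ties toward the smaller store value.
import Mathlib
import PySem

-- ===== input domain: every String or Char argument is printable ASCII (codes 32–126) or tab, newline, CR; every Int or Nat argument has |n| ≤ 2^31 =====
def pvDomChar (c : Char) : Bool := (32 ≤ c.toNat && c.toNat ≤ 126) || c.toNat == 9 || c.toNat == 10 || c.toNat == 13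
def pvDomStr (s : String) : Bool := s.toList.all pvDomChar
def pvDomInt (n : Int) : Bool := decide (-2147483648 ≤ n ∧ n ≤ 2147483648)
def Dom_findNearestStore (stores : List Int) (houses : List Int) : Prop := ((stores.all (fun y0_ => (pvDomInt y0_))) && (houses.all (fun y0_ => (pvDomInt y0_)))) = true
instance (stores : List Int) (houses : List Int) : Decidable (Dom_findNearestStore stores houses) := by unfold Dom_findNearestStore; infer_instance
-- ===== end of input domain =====

-- B replaces A's sort + binary search by a plain linear scan per house keeping the
-- running nearest store (distance ties broken toward the smaller store value); same
-- results, no sort, no bisect ("simpler"; no speed claim).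

-- ===== PORT A =====
-- Python A: stores = sorted(stores); per house, pos = bisect_left(stores, house),
-- then pick stores[0] / stores[-1] / the closer of stores[pos-1], stores[pos]
-- (ties to stores[pos-1]).  Indexing is total pyGetD under Pre_ (stores nonempty
-- whenever a house is processed); bisect_left is PySem.List.bisectLeft.
def findNearestStore (stores : List Int) (houses : List Int) : List Int :=
  let ss := PySem.List.sorted stores (fun x => x) false
  houses.foldl (fun result house =>
    let pos := PySem.List.bisectLeft ss house
    if pos = 0 then
      result ++ [PySem.List.pyGetD ss (0 : Int) 0]
    else if pos = ss.length then
      result ++ [PySem.List.pyGetD ss (-1 : Int) 0]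
    else if house - PySem.List.pyGetD ss ((pos : Int) - 1) 0 ≤
              PySem.List.pyGetD ss (pos : Int) 0 - house then
      result ++ [PySem.List.pyGetD ss ((pos : Int) - 1) 0]
    else
      result ++ [PySem.List.pyGetD ss (pos : Int) 0]) []

-- ===== PORT B =====
-- Python B: per house, best = stores[0]; for each s, update best when s is strictly
-- closer, or equally close and smaller; append best.
def findNearestStore_alt (stores : List Int) (houses : List Int) : List Int :=
  houses.foldl (fun result house =>
    let best := stores.foldl (fun best s =>
      let d := |house - s|
      let bd := |house - best|
      if d < bd ∨ (d = bd ∧ s < best) then s else best)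
      (PySem.List.pyGetD stores (0 : Int) 0)
    result ++ [best]) []

-- ===== PRECONDITION & SPEC =====
-- Pre_ excludes exactly the inputs where Python A raises IndexError (stores[0] with
-- empty stores, reached iff stores = [] and houses ≠ []); Python B raises there too.
def Pre_findNearestStore (stores : List Int) (houses : List Int) : Prop :=
  stores ≠ [] ∨ houses = []
instance (stores : List Int) (houses : List Int) : Decidable (Pre_findNearestStore stores houses) := by unfold Pre_findNearestStore; infer_instance

def pvWitness_findNearestStore : List Int × List Int := ([4, -1, 7], [0, 5, 6])

def Spec_findNearestStore (stores : List Int) (houses : List Int) (out : List Int) : Prop := out = findNearestStore_alt stores houses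
instance (stores : List Int) (houses : List Int) (out : List Int) : Decidable (Spec_findNearestStore stores houses out) := by unfold Spec_findNearestStore; infer_instance

-- ===== CLAIM (what is proved, stated in full; the proofs are below) =====
def Claim_equal_findNearestStore : Prop := ∀ (stores : List Int) (houses : List Int), Dom_findNearestStore stores houses → Pre_findNearestStore stores houses → Spec_findNearestStore stores houses (findNearestStore stores houses)

-- ===== LEMMAS AND PROOFS =====

-- "a is at least as good a store for house h as b": strictly closer, or equally
-- close and no larger.  The common specification both picks satisfy.
def keyle (h a b : Int) : Prop := |h - a| < |h - b| ∨ (|h - a| = |h - b| ∧ a ≤ b)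

theorem keyle_refl (h a : Int) : keyle h a a := Or.inr ⟨rfl, le_refl a⟩

theorem keyle_antisymm {h a b : Int} (h1 : keyle h a b) (h2 : keyle h b a) : a = b := by
  unfold keyle at h1 h2
  rcases abs_cases (h - a) with ⟨e1, _⟩ | ⟨e1, _⟩ <;>
    rcases abs_cases (h - b) with ⟨e2, _⟩ | ⟨e2, _⟩ <;> omega

theorem keyle_trans {h a b c : Int} (h1 : keyle h a b) (h2 : keyle h b c) : keyle h a c := by
  unfold keyle at h1 h2 ⊢
  rcases abs_cases (h - a) with ⟨e1, _⟩ | ⟨e1, _⟩ <;>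
    rcases abs_cases (h - b) with ⟨e2, _⟩ | ⟨e2, _⟩ <;>
    rcases abs_cases (h - c) with ⟨e3, _⟩ | ⟨e3, _⟩ <;> omega

theorem keyle_of_le_of_le {h a b : Int} (h1 : h ≤ a) (h2 : a ≤ b) : keyle h a b := by
  unfold keyle
  rcases abs_cases (h - a) with ⟨e1, _⟩ | ⟨e1, _⟩ <;>
    rcases abs_cases (h - b) with ⟨e2, _⟩ | ⟨e2, _⟩ <;> omega

theorem keyle_of_ge_of_ge {h a b : Int} (h1 : b ≤ a) (h2 : a ≤ h) : keyle h a b := by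
  unfold keyle
  rcases abs_cases (h - a) with ⟨e1, _⟩ | ⟨e1, _⟩ <;>
    rcases abs_cases (h - b) with ⟨e2, _⟩ | ⟨e2, _⟩ <;> omega

theorem keyle_mid_left {h a y : Int} (h1 : a ≤ h) (h2 : h ≤ y) (h3 : h - a ≤ y - h) :
    keyle h a y := by
  unfold keyle
  rcases abs_cases (h - a) with ⟨e1, _⟩ | ⟨e1, _⟩ <;>
    rcases abs_cases (h - y) with ⟨e2, _⟩ | ⟨e2, _⟩ <;> omega

theorem keyle_mid_right {h b y a : Int} (h1 : h ≤ b) (h2 : y ≤ a) (h3 : a ≤ h)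
    (h4 : b - h < h - a) : keyle h b y := by
  unfold keyle
  rcases abs_cases (h - b) with ⟨e1, _⟩ | ⟨e1, _⟩ <;>
    rcases abs_cases (h - y) with ⟨e2, _⟩ | ⟨e2, _⟩ <;> omega

-- The element A appends for one house (ss is the sorted store list).
def pickA (ss : List Int) (house : Int) : Int :=
  let pos := PySem.List.bisectLeft ss house
  if pos = 0 then
    PySem.List.pyGetD ss (0 : Int) 0
  else if pos = ss.length then
    PySem.List.pyGetD ss (-1 : Int) 0
  else if house - PySem.List.pyGetD ss ((pos : Int) - 1) 0 ≤
            PySem.List.pyGetD ss (pos : Int) 0 - house then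
    PySem.List.pyGetD ss ((pos : Int) - 1) 0
  else
    PySem.List.pyGetD ss (pos : Int) 0

-- The element B appends for one house.
def pickB (stores : List Int) (house : Int) : Int :=
  stores.foldl (fun best s =>
    let d := |house - s|
    let bd := |house - best|
    if d < bd ∨ (d = bd ∧ s < best) then s else best)
    (PySem.List.pyGetD stores (0 : Int) 0)

theorem findNearestStore_eq_map (stores houses : List Int) :
    findNearestStore stores houses =
      houses.map (pickA (PySem.List.sorted stores (fun x => x) false)) := by
  simp only [findNearestStore]
  have hb : (fun (result : List Int) (house : Int) =>
      let pos := PySem.List.bisectLeft (PySem.List.sorted stores (fun x => x) false) house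
      if pos = 0 then
        result ++ [PySem.List.pyGetD (PySem.List.sorted stores (fun x => x) false) (0 : Int) 0]
      else if pos = (PySem.List.sorted stores (fun x => x) false).length then
        result ++ [PySem.List.pyGetD (PySem.List.sorted stores (fun x => x) false) (-1 : Int) 0]
      else if house - PySem.List.pyGetD (PySem.List.sorted stores (fun x => x) false) ((pos : Int) - 1) 0 ≤
                PySem.List.pyGetD (PySem.List.sorted stores (fun x => x) false) (pos : Int) 0 - house then
        result ++ [PySem.List.pyGetD (PySem.List.sorted stores (fun x => x) false) ((pos : Int) - 1) 0]
      else
        result ++ [PySem.List.pyGetD (PySem.List.sorted stores (fun x => x) false) (pos : Int) 0])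
      = fun result house => result ++ [pickA (PySem.List.sorted stores (fun x => x) false) house] := by
    funext result house
    simp only [pickA]
    split_ifs <;> rfl
  rw [hb, PySem.List.foldl_append_singleton_eq_map]
  simp

theorem findNearestStore_alt_eq_map (stores houses : List Int) :
    findNearestStore_alt stores houses = houses.map (pickB stores) := by
  unfold findNearestStore_alt
  rw [show (fun (result : List Int) (house : Int) =>
      let best := stores.foldl (fun best s =>
        let d := |house - s|
        let bd := |house - best|
        if d < bd ∨ (d = bd ∧ s < best) then s else best)
        (PySem.List.pyGetD stores (0 : Int) 0)
      result ++ [best]) = fun result house => result ++ [pickB stores house] from rfl,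
    PySem.List.foldl_append_singleton_eq_map]
  simp

-- The running-best fold: its result is the initial value or an element of the list,
-- is at least as good as the initial value, and at least as good as every element.
theorem foldB_spec (house : Int) (l : List Int) (b0 : Int) :
    (l.foldl (fun best s =>
        let d := |house - s|
        let bd := |house - best|
        if d < bd ∨ (d = bd ∧ s < best) then s else best) b0 = b0 ∨
     l.foldl (fun best s =>
        let d := |house - s|
        let bd := |house - best|
        if d < bd ∨ (d = bd ∧ s < best) then s else best) b0 ∈ l) ∧
    keyle house (l.foldl (fun best s =>
        let d := |house - s|
        let bd := |house - best|
        if d < bd ∨ (d = bd ∧ s < best) then s else best) b0) b0 ∧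
    ∀ s ∈ l, keyle house (l.foldl (fun best s =>
        let d := |house - s|
        let bd := |house - best|
        if d < bd ∨ (d = bd ∧ s < best) then s else best) b0) s := by
  induction l generalizing b0 with
  | nil => exact ⟨Or.inl rfl, keyle_refl house b0, by simp⟩
  | cons x t ih =>
    simp only [List.foldl_cons]
    by_cases hc : |house - x| < |house - b0| ∨ (|house - x| = |house - b0| ∧ x < b0)
    · -- step takes x
      have hstep : (let d := |house - x|
          let bd := |house - b0|
          if d < bd ∨ (d = bd ∧ x < b0) then x else b0) = x := by simp [hc]
      rw [hstep]
      obtain ⟨hmem, hinit, hall⟩ := ih x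
      refine ⟨?_, ?_, ?_⟩
      · rcases hmem with h | h
        · exact Or.inr (by simp [h])
        · exact Or.inr (List.mem_cons_of_mem _ h)
      · -- keyle _ r b0 via keyle _ r x and keyle _ x b0
        have hxb : keyle house x b0 := by
          unfold keyle
          rcases hc with h | ⟨h1, h2⟩
          · exact Or.inl h
          · exact Or.inr ⟨h1, le_of_lt h2⟩
        exact keyle_trans hinit hxb
      · intro s hs
        rcases List.mem_cons.mp hs with rfl | hsl
        · exact hinit
        · exact hall s hsl
    · -- step keeps b0
      have hstep : (let d := |house - x|
          let bd := |house - b0|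
          if d < bd ∨ (d = bd ∧ x < b0) then x else b0) = b0 := by simp [hc]
      rw [hstep]
      obtain ⟨hmem, hinit, hall⟩ := ih b0
      refine ⟨?_, hinit, ?_⟩
      · rcases hmem with h | h
        · exact Or.inl h
        · exact Or.inr (List.mem_cons_of_mem _ h)
      · intro s hs
        rcases List.mem_cons.mp hs with rfl | hsl
        · -- keyle _ r s from keyle _ r b0 and keyle _ b0 s (since the update refused s)
          have hbs : keyle house b0 s := by
            unfold keyle
            push Not at hc
            rcases abs_cases (house - b0) with ⟨e1, _⟩ | ⟨e1, _⟩ <;>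
              rcases abs_cases (house - s) with ⟨e2, _⟩ | ⟨e2, _⟩ <;> omega
          exact keyle_trans hinit hbs
        · exact hall s hsl

theorem pickB_spec (stores : List Int) (house : Int) (hne : stores ≠ []) :
    pickB stores house ∈ stores ∧ ∀ s ∈ stores, keyle house (pickB stores house) s := by
  obtain ⟨hmem, _, hall⟩ := foldB_spec house stores (PySem.List.pyGetD stores (0 : Int) 0)
  have hinit : PySem.List.pyGetD stores (0 : Int) 0 ∈ stores := by
    rw [PySem.List.pyGetD_zero]
    cases stores with
    | nil => exact absurd rfl hne
    | cons a t => simp [List.getD]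
  unfold pickB
  rcases hmem with h | h
  · refine ⟨?_, hall⟩
    rw [h]; exact hinit
  · exact ⟨h, hall⟩

theorem pickA_spec (ss : List Int) (house : Int)
    (hp : List.Pairwise (fun a b => a ≤ b) ss) (hne : ss ≠ []) :
    pickA ss house ∈ ss ∧ ∀ s ∈ ss, keyle house (pickA ss house) s := by
  obtain ⟨hple, hlt, hge⟩ := PySem.List.bisectLeft_spec ss house hp
  have hmono : ∀ (i j : Nat) (_ : i < ss.length) (hj : j < ss.length), i ≤ j → ss[i] ≤ ss[j] := by
    intro i j hi hj hij
    rcases eq_or_lt_of_le hij with rfl | hlt'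
    · exact le_refl _
    · exact List.pairwise_iff_getElem.mp hp i j hi hj hlt'
  have hlen : 0 < ss.length := List.length_pos_iff.mpr hne
  set pos := PySem.List.bisectLeft ss house with hpos
  simp only [pickA]
  rw [← hpos]
  split_ifs with h0 hl hcmp
  · -- pos = 0 : everything is ≥ house; take ss[0]
    have hv : PySem.List.pyGetD ss (0 : Int) 0 = ss[0] := by
      rw [PySem.List.pyGetD_zero, List.getD_eq_getElem ss 0 hlen]
    rw [hv]
    refine ⟨List.getElem_mem hlen, ?_⟩
    intro s hs
    obtain ⟨j, hj, rfl⟩ := List.mem_iff_getElem.mp hs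
    exact keyle_of_le_of_le (hge 0 hlen (by omega)) (hmono 0 j hlen hj (Nat.zero_le j))
  · -- pos = length : everything is < house; take the last element
    have hv : PySem.List.pyGetD ss (-1 : Int) 0 = ss[ss.length - 1] := by
      rw [PySem.List.pyGetD_neg_one ss 0 hne, List.getLast_eq_getElem]
    rw [hv]
    refine ⟨List.getElem_mem (by omega), ?_⟩
    intro s hs
    obtain ⟨j, hj, rfl⟩ := List.mem_iff_getElem.mp hs
    exact keyle_of_ge_of_ge (hmono j (ss.length - 1) hj (by omega) (by omega))
      (le_of_lt (hlt (ss.length - 1) (by omega) (by omega)))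
  · -- tie or left closer: take ss[pos-1]
    have hpos1 : 1 ≤ pos := Nat.one_le_iff_ne_zero.mpr h0
    have hposlt : pos < ss.length := lt_of_le_of_ne hple hl
    have ha : PySem.List.pyGetD ss ((pos : Int) - 1) 0 = ss[pos - 1] := by
      rw [show ((pos : Int) - 1) = ((pos - 1 : Nat) : Int) by omega,
        PySem.List.pyGetD_natCast, List.getD_eq_getElem ss 0 (n := pos - 1) (by omega)]
    have hb : PySem.List.pyGetD ss (pos : Int) 0 = ss[pos] := by
      rw [PySem.List.pyGetD_natCast, List.getD_eq_getElem ss 0 (n := pos) hposlt]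
    have halt : ss[pos - 1] < house := hlt (pos - 1) (by omega) (by omega)
    have hbge : house ≤ ss[pos] := hge pos hposlt (le_refl pos)
    rw [ha, hb] at hcmp
    rw [ha]
    refine ⟨List.getElem_mem (by omega), ?_⟩
    intro s hs
    obtain ⟨j, hj, rfl⟩ := List.mem_iff_getElem.mp hs
    by_cases hjp : j < pos
    · exact keyle_of_ge_of_ge (hmono j (pos - 1) hj (by omega) (by omega)) (le_of_lt halt)
    · exact keyle_mid_left (le_of_lt halt) (hge j hj (by omega))
        (le_trans hcmp (by have := hmono pos j hposlt hj (by omega); omega))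
  · -- right strictly closer: take ss[pos]
    have hpos1 : 1 ≤ pos := Nat.one_le_iff_ne_zero.mpr h0
    have hposlt : pos < ss.length := lt_of_le_of_ne hple hl
    have ha : PySem.List.pyGetD ss ((pos : Int) - 1) 0 = ss[pos - 1] := by
      rw [show ((pos : Int) - 1) = ((pos - 1 : Nat) : Int) by omega,
        PySem.List.pyGetD_natCast, List.getD_eq_getElem ss 0 (n := pos - 1) (by omega)]
    have hb : PySem.List.pyGetD ss (pos : Int) 0 = ss[pos] := by
      rw [PySem.List.pyGetD_natCast, List.getD_eq_getElem ss 0 (n := pos) hposlt]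
    have halt : ss[pos - 1] < house := hlt (pos - 1) (by omega) (by omega)
    have hbge : house ≤ ss[pos] := hge pos hposlt (le_refl pos)
    rw [ha, hb] at hcmp
    rw [hb]
    refine ⟨List.getElem_mem hposlt, ?_⟩
    intro s hs
    obtain ⟨j, hj, rfl⟩ := List.mem_iff_getElem.mp hs
    by_cases hjp : j < pos
    · exact keyle_mid_right hbge (hmono j (pos - 1) hj (by omega) (by omega))
        (le_of_lt halt) (by omega)
    · exact keyle_of_le_of_le hbge (hmono pos j hposlt hj (by omega))

theorem pick_eq (stores : List Int) (house : Int) (hne : stores ≠ []) :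
    pickA (PySem.List.sorted stores (fun x => x) false) house = pickB stores house := by
  set ss := PySem.List.sorted stores (fun x => x) false with hss
  have hmem : ∀ x : Int, x ∈ ss ↔ x ∈ stores := fun x =>
    PySem.List.mem_sorted stores (fun x => x) false x
  have hsne : ss ≠ [] := by
    intro h
    exact hne (by simpa [h] using (PySem.List.sorted_eq_nil_iff stores (fun x => x) false).mp h)
  have hp : List.Pairwise (fun a b => a ≤ b) ss := by
    simpa using PySem.List.sorted_pairwise stores (fun x => x)
  obtain ⟨hAmem, hAall⟩ := pickA_spec ss house hp hsne
  obtain ⟨hBmem, hBall⟩ := pickB_spec stores house hne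
  exact keyle_antisymm (hAall _ ((hmem _).mpr hBmem)) (hBall _ ((hmem _).mp hAmem))

-- ===== VERDICT (by name: the statement is the Claim_ definition above) =====
theorem findNearestStore_spec : Claim_equal_findNearestStore := by
  intro stores houses _ hpre
  unfold Spec_findNearestStore
  rcases hpre with hne | rfl
  · rw [findNearestStore_eq_map, findNearestStore_alt_eq_map]
    exact List.map_congr_left fun house _ => pick_eq stores house hne
  · rfl
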